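-- pv_equiv track=rewrite | github.com/s2e-lab/Code-Smell-Code-Generation | Validation/PylintSamples/R1731_154236.py | nacl_bindings_pick_scrypt_params
-- ===== SOURCE A (Python) =====
-- def nacl_bindings_pick_scrypt_params(opslimit, memlimit):
--     """Python implementation of libsodium's pickparams"""
--
--     if opslimit < 32768:
--         opslimit = 32768
--
--     r = 8
--
--     if opslimit < (memlimit // 32):
--         p = 1
--         maxn = opslimit // (4 * r)
--         for n_log2 in range(1, 63):  # pragma: no branch
--             if (2 ** n_log2) > (maxn // 2):
--                 break
--     else:
--         maxn = memlimit // (r * 128)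
--         for n_log2 in range(1, 63):  # pragma: no branch
--             if (2 ** n_log2) > maxn // 2:
--                 break
--
--         maxrp = (opslimit // 4) // (2 ** n_log2)
--
--         if maxrp > 0x3fffffff:  # pragma: no cover
--             maxrp = 0x3fffffff
--
--         p = maxrp // r
--
--     return n_log2, r, p
-- ===== SOURCE B (Python) =====
-- def _pick_n_log2(maxn):
--     # smallest k in 1..62 with 2**k > maxn//2 (62 if none), via bit arithmetic
--     m = maxn // 2
--     return 1 if m < 2 else min(m.bit_length(), 62)
--
--
-- def nacl_bindings_pick_scrypt_params(opslimit, memlimit):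
--     opslimit = max(opslimit, 32768)
--     r = 8
--     if opslimit < memlimit // 32:
--         return _pick_n_log2(opslimit // (4 * r)), r, 1
--     n_log2 = _pick_n_log2(memlimit // (r * 128))
--     maxrp = min((opslimit // 4) // (2 ** n_log2), 0x3fffffff)
--     return n_log2, r, maxrp // r
-- ===== Notes on version B (the rewrite author's own statement) =====
-- stated objective: idiomatic
-- what changed: The bounded linear search 'for n_log2 in range(1,63): if 2**n_log2 > maxn//2: break' is replaced by a closed-form bit_length computation (shared helper), and the clamps become max/min expressions.
import Mathlib
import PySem

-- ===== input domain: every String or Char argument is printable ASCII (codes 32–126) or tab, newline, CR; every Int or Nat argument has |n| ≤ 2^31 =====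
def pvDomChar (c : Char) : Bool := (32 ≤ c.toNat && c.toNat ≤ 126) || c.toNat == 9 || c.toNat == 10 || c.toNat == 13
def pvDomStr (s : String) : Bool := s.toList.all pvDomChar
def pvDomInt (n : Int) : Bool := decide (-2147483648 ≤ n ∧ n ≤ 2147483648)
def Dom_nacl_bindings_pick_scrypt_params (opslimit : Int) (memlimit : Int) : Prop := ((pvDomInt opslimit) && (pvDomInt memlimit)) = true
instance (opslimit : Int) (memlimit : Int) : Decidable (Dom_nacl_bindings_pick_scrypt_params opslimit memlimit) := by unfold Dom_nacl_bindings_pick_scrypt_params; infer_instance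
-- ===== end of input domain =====

-- B replaces the bounded linear search for n_log2 with a closed-form bit_length computation (idiomatic).


-- ===== PORT A =====
-- the 'for n_log2 in range(1,63): if 2**n_log2 > m: break' loop: scans the range list,
-- stops at the first k with 2^k > m, otherwise ends with the last element in n_log2
def pvLoopA (m : Int) : List Int → Int → Int
  | [], cur => cur
  | k :: ks, _ => if (2:Int) ^ k.toNat > m then k else pvLoopA m ks k

def nacl_bindings_pick_scrypt_params (opslimit : Int) (memlimit : Int) : Int × Int × Int :=
  let opslimit := if opslimit < 32768 then 32768 else opslimit
  let r : Int := 8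
  if opslimit < PySem.Int.floordiv memlimit 32 then
    let p : Int := 1
    let maxn := PySem.Int.floordiv opslimit (4 * r)
    let n_log2 := pvLoopA (PySem.Int.floordiv maxn 2) (PySem.List.pyRange 1 63 1) 0
    (n_log2, r, p)
  else
    let maxn := PySem.Int.floordiv memlimit (r * 128)
    let n_log2 := pvLoopA (PySem.Int.floordiv maxn 2) (PySem.List.pyRange 1 63 1) 0
    let maxrp := PySem.Int.floordiv (PySem.Int.floordiv opslimit 4) ((2:Int) ^ n_log2.toNat)
    let maxrp := if maxrp > 0x3fffffff then 0x3fffffff else maxrp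
    let p := PySem.Int.floordiv maxrp r
    (n_log2, r, p)

-- ===== PORT B =====
-- m.bit_length() for m ≥ 2 is Nat.log2 m + 1 (exact on positive ints)
def pvPickNLog2 (maxn : Int) : Int :=
  let m := PySem.Int.floordiv maxn 2
  if m < 2 then 1 else min (Int.ofNat (Nat.log2 m.toNat + 1)) 62

def nacl_bindings_pick_scrypt_params_alt (opslimit : Int) (memlimit : Int) : Int × Int × Int :=
  let opslimit := max opslimit 32768
  let r : Int := 8
  if opslimit < PySem.Int.floordiv memlimit 32 then
    (pvPickNLog2 (PySem.Int.floordiv opslimit (4 * r)), r, 1)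
  else
    let n_log2 := pvPickNLog2 (PySem.Int.floordiv memlimit (r * 128))
    let maxrp := min (PySem.Int.floordiv (PySem.Int.floordiv opslimit 4) ((2:Int) ^ n_log2.toNat)) 0x3fffffff
    (n_log2, r, PySem.Int.floordiv maxrp r)

-- ===== PRECONDITION & SPEC =====
def Spec_nacl_bindings_pick_scrypt_params (opslimit : Int) (memlimit : Int) (out : Int × Int × Int) : Prop := out = nacl_bindings_pick_scrypt_params_alt opslimit memlimit
instance (opslimit : Int) (memlimit : Int) (out : Int × Int × Int) : Decidable (Spec_nacl_bindings_pick_scrypt_params opslimit memlimit out) := by unfold Spec_nacl_bindings_pick_scrypt_params; infer_instance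

-- ===== CLAIM (what is proved, stated in full; the proofs are below) =====
def Claim_equal_nacl_bindings_pick_scrypt_params : Prop := ∀ (opslimit : Int) (memlimit : Int), Dom_nacl_bindings_pick_scrypt_params opslimit memlimit → Spec_nacl_bindings_pick_scrypt_params opslimit memlimit (nacl_bindings_pick_scrypt_params opslimit memlimit)

-- ===== LEMMAS AND PROOFS =====

-- the loop over range(j,63), once it has been reached with 2^(j-1) ≤ m, returns min (bit_length m) 62
theorem pvLoopA_from (m : Int) : ∀ n j : Nat, j + n = 63 → 1 ≤ j →
    (2:Int) ^ (j - 1) ≤ m →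
    pvLoopA m (PySem.List.pyRange (j : Int) 63 1) ((j : Int) - 1) = min (Int.ofNat (Nat.log2 m.toNat + 1)) 62 := by
  intro n
  induction n with
  | zero =>
    intro j hj _ hm
    have hj63 : j = 63 := by omega
    subst hj63
    rw [PySem.List.pyRange_one_eq_nil (by norm_num)]
    have h1 : (2:Int) ^ 62 ≤ m := by norm_num at hm ⊢; exact hm
    have h2 : (2^62 : Nat) ≤ m.toNat := by
      have : ((2^62 : Nat) : Int) ≤ m := by push_cast; exact h1
      omega
    have h3 : 62 ≤ Nat.log2 m.toNat := (Nat.le_log2 (by omega)).2 (by exact_mod_cast h2)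
    simp [pvLoopA, min_def]
    omega
  | succ n ih =>
    intro j hj hj1 hm
    have hjlt : ((j:Int)) < 63 := by exact_mod_cast (by omega : j < 63)
    rw [PySem.List.pyRange_one_cons hjlt]
    simp only [pvLoopA, Int.toNat_natCast]
    -- facts about m.toNat and powers of two at exponent j
    have hmpos : (1:Int) ≤ m := le_trans (one_le_pow₀ (by norm_num)) hm
    have hlow : (2 ^ (j-1) : Nat) ≤ m.toNat := by
      have : ((2 ^ (j-1) : Nat) : Int) ≤ m := by push_cast; exact hm
      omega
    split_ifs with hbr
    · -- break at j : 2^j > m, so bit_length m = j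
      have hup : m.toNat < 2 ^ j := by
        have : m < ((2 ^ j : Nat) : Int) := by push_cast; exact hbr
        omega
      have hlog : Nat.log2 m.toNat = j - 1 := by
        have h1 : j - 1 ≤ Nat.log2 m.toNat := (Nat.le_log2 (by omega)).2 hlow
        have h2 : Nat.log2 m.toNat < j := (Nat.log2_lt (by omega)).2 hup
        omega
      rw [hlog]
      have hj62 : (j:Int) ≤ 62 := by exact_mod_cast (by omega : j ≤ 62)
      have hcast : Int.ofNat (j - 1 + 1) = (j:Int) := by simp only [Int.ofNat_eq_natCast]; push_cast; omega
      rw [hcast, min_eq_left hj62]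
    · -- no break: recurse with j+1
      push Not at hbr
      have := ih (j+1) (by omega) (by omega)
        (by simpa using (by simpa using hbr : (2:Int) ^ j ≤ m))
      rw [show ((j:Int)+1 : Int) = ((j+1 : Nat) : Int) by push_cast; ring] at *
      simpa using this

theorem pvLoopA_eq (m : Int) :
    pvLoopA m (PySem.List.pyRange 1 63 1) 0 =
      (if m < 2 then 1 else min (Int.ofNat (Nat.log2 m.toNat + 1)) 62) := by
  split_ifs with h
  · rw [PySem.List.pyRange_one_cons (by norm_num)]
    simp [pvLoopA]
    omega
  · have := pvLoopA_from m 62 1 (by norm_num) (by norm_num) (by norm_num; omega)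
    simpa using this

-- ===== VERDICT (by name: the statement is the Claim_ definition above) =====
theorem nacl_bindings_pick_scrypt_params_spec : Claim_equal_nacl_bindings_pick_scrypt_params := by
  intro o mem _
  unfold Spec_nacl_bindings_pick_scrypt_params nacl_bindings_pick_scrypt_params nacl_bindings_pick_scrypt_params_alt pvPickNLog2
  have hmax : (if o < 32768 then (32768:Int) else o) = max o 32768 := by
    rw [max_def]; split_ifs <;> omega
  rw [hmax]
  simp only [pvLoopA_eq, min_def]
  split_ifs <;> simp_all <;> omega
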